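-- pv_equiv track=rewrite | github.com/smarquesgomez/helper | ifxanalyzer/analyzers/checkpoints.py | _extract_physical_log_warning
-- ===== SOURCE A (Python) =====
-- def _extract_physical_log_warning(lines):
--     start = None
--     for idx, line in enumerate(lines):
--         if line.strip().startswith("Based on the current workload"):
--             start = idx
--             break
--     if start is None:
--         return None
--     result = []
--     for j in range(start, len(lines)):
--         if j > start and not lines[j].strip():
--             break
--         result.append(lines[j].rstrip("\n"))
--     return "\n".join(result)
-- ===== SOURCE B (Python) =====
-- def _extract_physical_log_warning(lines):
--     result = None
--     for line in lines:
--         if result is None: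
--             if line.strip().startswith("Based on the current workload"):
--                 result = [line.rstrip("\n")]
--         else:
--             if not line.strip():
--                 break
--             result.append(line.rstrip("\n"))
--     if result is None:
--         return None
--     return "\n".join(result)
-- ===== Notes on version B (the rewrite author's own statement) =====
-- stated objective: simpler
-- what changed: Replaced A's two sequential passes (index search with enumerate, then an indexed range loop with a j>start blank test) by one stateful scan over the lines with an optional accumulator serving as the 'started' flag, with no index arithmetic.
import Mathlib
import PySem

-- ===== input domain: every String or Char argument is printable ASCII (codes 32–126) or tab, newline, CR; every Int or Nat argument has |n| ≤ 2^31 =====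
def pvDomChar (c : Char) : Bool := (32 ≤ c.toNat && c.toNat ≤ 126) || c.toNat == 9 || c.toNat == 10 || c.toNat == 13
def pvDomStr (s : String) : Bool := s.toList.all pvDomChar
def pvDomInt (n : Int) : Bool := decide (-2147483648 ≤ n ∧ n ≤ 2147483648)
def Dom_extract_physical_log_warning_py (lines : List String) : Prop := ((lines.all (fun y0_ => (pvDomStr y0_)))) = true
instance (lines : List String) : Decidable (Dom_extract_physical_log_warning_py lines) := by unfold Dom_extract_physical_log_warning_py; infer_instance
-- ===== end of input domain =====

-- B replaces A's two sequential passes (index search, then an indexed range loop) by one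
-- stateful scan with an optional accumulator as the 'started' flag; objective: simpler.


-- exact port of Python's s.rstrip("\n"): remove all trailing '\n' characters (shared primitive)
def pvRstripNL (s : String) : String :=
  String.ofList ((s.toList.reverse.dropWhile (fun c => c == '\n')).reverse)

-- ===== PORT A =====
-- first loop of A: enumerate, return index of first line whose strip() starts with the marker
def pvA_find : List String → Nat → Option Nat
  | [], _ => none
  | l :: rest, idx =>
    if PySem.Str.startswith (PySem.Str.strip l) "Based on the current workload" then some idx
    else pvA_find rest (idx + 1)

-- second loop of A: for j in range(start, len(lines)) over lines.drop start, with the j > start blank test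
def pvA_loop (start : Nat) : List String → Nat → List String
  | [], _ => []
  | l :: rest, j =>
    if j > start ∧ PySem.Str.strip l == "" then []
    else pvRstripNL l :: pvA_loop start rest (j + 1)

def extract_physical_log_warning_py (lines : List String) : Option String :=
  match pvA_find lines 0 with
  | none => none
  | some start => some (PySem.Str.join "\n" (pvA_loop start (lines.drop start) start))

-- ===== PORT B =====
-- single scan; accumulator 'none' = not yet started, 'some acc' = collecting
def pvB_go : List String → Option (List String) → Option (List String)
  | [], acc => acc
  | l :: rest, none =>
    if PySem.Str.startswith (PySem.Str.strip l) "Based on the current workload" then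
      pvB_go rest (some [pvRstripNL l])
    else pvB_go rest none
  | l :: rest, some acc =>
    if PySem.Str.strip l == "" then some acc
    else pvB_go rest (some (acc ++ [pvRstripNL l]))

def extract_physical_log_warning_py_alt (lines : List String) : Option String :=
  (pvB_go lines none).map (PySem.Str.join "\n")

-- ===== PRECONDITION & SPEC =====
def Spec_extract_physical_log_warning_py (lines : List String) (out : Option String) : Prop := out = extract_physical_log_warning_py_alt lines
instance (lines : List String) (out : Option String) : Decidable (Spec_extract_physical_log_warning_py lines out) := by unfold Spec_extract_physical_log_warning_py; infer_instance

-- ===== CLAIM (what is proved, stated in full; the proofs are below) =====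
def Claim_equal_extract_physical_log_warning_py : Prop := ∀ (lines : List String), Dom_extract_physical_log_warning_py lines → Spec_extract_physical_log_warning_py lines (extract_physical_log_warning_py lines)

-- ===== LEMMAS AND PROOFS =====

-- A's tail collection (all j > start): map rstrip over lines up to the first blank one
def pvTail : List String → List String
  | [] => []
  | l :: rest => if PySem.Str.strip l == "" then [] else pvRstripNL l :: pvTail rest

theorem pvA_loop_gt (rest : List String) : ∀ start j, start < j → pvA_loop start rest j = pvTail rest := by
  induction rest with
  | nil => intro start j _; rfl
  | cons l rs ih =>
    intro start j h
    simp only [pvA_loop, pvTail]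
    by_cases hb : PySem.Str.strip l == ""
    · simp [hb, h]
    · simp [hb, ih start (j + 1) (Nat.lt_succ_of_lt h)]

theorem pvA_loop_start (xs : List String) (s : Nat) :
    pvA_loop s xs s = match xs with | [] => [] | l :: rs => pvRstripNL l :: pvTail rs := by
  cases xs with
  | nil => rfl
  | cons l rs =>
    simp only [pvA_loop]
    rw [if_neg (by simp), pvA_loop_gt rs s (s + 1) (Nat.lt_succ_self s)]

theorem pvA_find_shift (lines : List String) : ∀ i, pvA_find lines (i + 1) = (pvA_find lines i).map (· + 1) := by
  induction lines with
  | nil => intro i; rfl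
  | cons l rs ih =>
    intro i
    simp only [pvA_find]
    split_ifs with h
    · rfl
    · exact ih (i + 1)

theorem pvB_go_some (rest : List String) : ∀ acc, pvB_go rest (some acc) = some (acc ++ pvTail rest) := by
  induction rest with
  | nil => intro acc; simp [pvB_go, pvTail]
  | cons l rs ih =>
    intro acc
    simp only [pvB_go, pvTail]
    split_ifs with h
    · simp
    · simp [ih (acc ++ [pvRstripNL l])]

theorem pv_main (lines : List String) :
    extract_physical_log_warning_py lines = extract_physical_log_warning_py_alt lines := by
  induction lines with
  | nil => rfl
  | cons l rs ih =>
    unfold extract_physical_log_warning_py extract_physical_log_warning_py_alt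
    simp only [pvA_find, pvB_go]
    split_ifs with h
    · -- marker found at the head
      simp only [List.drop_zero, pvA_loop_start, pvB_go_some, Option.map_some]
      rfl
    · -- head is not the marker line: both sides reduce to the result on rs
      rw [pvA_find_shift rs 0]
      unfold extract_physical_log_warning_py extract_physical_log_warning_py_alt at ih
      cases hf : pvA_find rs 0 with
      | none => simpa [hf] using ih
      | some s => simpa [hf, List.drop_succ_cons, pvA_loop_start] using ih

-- ===== VERDICT (by name: the statement is the Claim_ definition above) =====
theorem extract_physical_log_warning_py_spec : Claim_equal_extract_physical_log_warning_py := by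
  intro lines _
  unfold Spec_extract_physical_log_warning_py
  exact pv_main lines
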